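-- pv_equiv track=rewrite | github.com/MleelR/CV | automatic-number-plate-recognition-python-yolov8-main-2/utilar.py | format_license
-- ===== SOURCE A (Python) =====
-- dict_char_to_int = {
--     'O': '0',
--     'I': '1',
--     'J': '3',
--     'A': '4',
--     'G': '6',
--     'S': '5'
-- }
--
-- dict_int_to_char = {
--     '0': 'O',
--     '1': 'I',
--     '3': 'J',
--     '4': 'A',
--     '6': 'G',
--     '5': 'S'
-- }
--
-- def format_license(text):
--     """Format the license plate text to match expected format."""
--     license_plate_ = ''
--     mapping = {0: dict_char_to_int, 1: dict_char_to_int, 4: dict_int_to_char, 5: dict_int_to_char,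
--                2: dict_char_to_int, 3: dict_int_to_char}
--
--     for j in range(min(len(text), 7)):  # Prevent out-of-range errors
--         if text[j] in mapping.get(j, {}):
--             license_plate_ += mapping[j][text[j]]
--         else:
--             license_plate_ += text[j]
--
--     return license_plate_
-- ===== SOURCE B (Python) =====
-- _C2I = str.maketrans('OIJAGS', '013465')
-- _I2C = str.maketrans('013465', 'OIJAGS')
--
-- def format_license(text):
--     """Format the license plate text to match expected format."""
--     return text[:3].translate(_C2I) + text[3:6].translate(_I2C) + text[6:7]
-- ===== Notes on version B (the rewrite author's own statement) =====
-- stated objective: idiomatic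
-- what changed: Replaced the per-index loop with dict dispatch by two str.maketrans tables applied to three bulk slice translations (text[:3], text[3:6], text[6:7]).
import Mathlib
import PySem

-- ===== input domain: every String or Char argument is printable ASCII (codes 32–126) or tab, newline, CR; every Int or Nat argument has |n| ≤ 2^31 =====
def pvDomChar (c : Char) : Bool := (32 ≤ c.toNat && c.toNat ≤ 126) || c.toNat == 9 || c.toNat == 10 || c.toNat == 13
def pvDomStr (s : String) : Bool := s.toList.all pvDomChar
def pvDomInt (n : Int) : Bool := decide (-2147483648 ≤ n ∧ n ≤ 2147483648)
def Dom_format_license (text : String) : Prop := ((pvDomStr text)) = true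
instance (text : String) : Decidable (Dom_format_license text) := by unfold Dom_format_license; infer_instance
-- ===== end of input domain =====

-- B replaces A's per-index loop with dict dispatch by three bulk slice translations (text[:3], text[3:6], text[6:7]) through two translation tables.

-- ===== PORT A =====
def dict_char_to_int : PySem.Dict Char Char :=
  PySem.Dict.ofList [('O', '0'), ('I', '1'), ('J', '3'), ('A', '4'), ('G', '6'), ('S', '5')]
def dict_int_to_char : PySem.Dict Char Char :=
  PySem.Dict.ofList [('0', 'O'), ('1', 'I'), ('3', 'J'), ('4', 'A'), ('6', 'G'), ('5', 'S')]
def fl_mapping : PySem.Dict Int (PySem.Dict Char Char) :=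
  PySem.Dict.ofList [(0, dict_char_to_int), (1, dict_char_to_int), (4, dict_int_to_char),
                     (5, dict_int_to_char), (2, dict_char_to_int), (3, dict_int_to_char)]

def format_license (text : String) : String :=
  let cs := text.toList
  let out := (PySem.List.pyRange 0 (min (cs.length : Int) 7) 1).foldl (fun acc j =>
    let c := PySem.List.pyGetD cs j ' '
    let dj := PySem.Dict.getD fl_mapping j PySem.Dict.empty
    if (PySem.Dict.get? dj c).isSome then
      acc ++ [PySem.Dict.getD dj c c]
    else
      acc ++ [c]) []
  String.ofList out


-- ===== PORT B =====
def fl_c2i (c : Char) : Char :=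
  if c = 'O' then '0' else if c = 'I' then '1' else if c = 'J' then '3'
  else if c = 'A' then '4' else if c = 'G' then '6' else if c = 'S' then '5' else c
def fl_i2c (c : Char) : Char :=
  if c = '0' then 'O' else if c = '1' then 'I' else if c = '3' then 'J'
  else if c = '4' then 'A' else if c = '6' then 'G' else if c = '5' then 'S' else c

def format_license_alt (text : String) : String :=
  let cs := text.toList
  String.ofList ((PySem.List.slice cs none (some 3)).map fl_c2i
          ++ (PySem.List.slice cs (some 3) (some 6)).map fl_i2c
          ++ PySem.List.slice cs (some 6) (some 7))



-- ===== PRECONDITION & SPEC =====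
def Spec_format_license (text : String) (out : String) : Prop := out = format_license_alt text
instance (text : String) (out : String) : Decidable (Spec_format_license text out) := by unfold Spec_format_license; infer_instance

-- ===== CLAIM (what is proved, stated in full; the proofs are below) =====
def Claim_equal_format_license : Prop := ∀ (text : String), Dom_format_license text → Spec_format_license text (format_license text)

-- ===== LEMMAS AND PROOFS =====
lemma char_cti (c : Char) :
    (if (PySem.Dict.get? dict_char_to_int c).isSome then PySem.Dict.getD dict_char_to_int c c else c) = fl_c2i c := by
  by_cases hO : c = 'O'; · subst hO; decide
  by_cases hI : c = 'I'; · subst hI; decide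
  by_cases hJ : c = 'J'; · subst hJ; decide
  by_cases hA : c = 'A'; · subst hA; decide
  by_cases hG : c = 'G'; · subst hG; decide
  by_cases hS : c = 'S'; · subst hS; decide
  have h : dict_char_to_int = PySem.Dict.mk [('O', '0'), ('I', '1'), ('J', '3'), ('A', '4'), ('G', '6'), ('S', '5')] := rfl
  rw [h]
  simp [PySem.Dict.get?, fl_c2i,
        Ne.symm hO, Ne.symm hI, Ne.symm hJ, Ne.symm hA, Ne.symm hG, Ne.symm hS,
        hO, hI, hJ, hA, hG, hS]

lemma char_itc (c : Char) :
    (if (PySem.Dict.get? dict_int_to_char c).isSome then PySem.Dict.getD dict_int_to_char c c else c) = fl_i2c c := by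
  by_cases h0 : c = '0'; · subst h0; decide
  by_cases h1 : c = '1'; · subst h1; decide
  by_cases h3 : c = '3'; · subst h3; decide
  by_cases h4 : c = '4'; · subst h4; decide
  by_cases h6 : c = '6'; · subst h6; decide
  by_cases h5 : c = '5'; · subst h5; decide
  have h : dict_int_to_char = PySem.Dict.mk [('0', 'O'), ('1', 'I'), ('3', 'J'), ('4', 'A'), ('6', 'G'), ('5', 'S')] := rfl
  rw [h]
  simp [PySem.Dict.get?, fl_i2c,
        Ne.symm h0, Ne.symm h1, Ne.symm h3, Ne.symm h4, Ne.symm h6, Ne.symm h5,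
        h0, h1, h3, h4, h6, h5]

lemma char_empty (c : Char) :
    (if (PySem.Dict.get? (PySem.Dict.empty (κ := Char) (ν := Char)) c).isSome then PySem.Dict.getD PySem.Dict.empty c c else c) = c := by
  simp [PySem.Dict.get?, PySem.Dict.empty]

lemma ite_app (p : Prop) [Decidable p] (acc : List Char) (x y : Char) :
    (if p then acc ++ [x] else acc ++ [y]) = acc ++ [if p then x else y] := by
  split_ifs <;> rfl

lemma ite_single (p : Prop) [Decidable p] (x y : Char) :
    (if p then [x] else [y]) = [if p then x else y] := by
  split_ifs <;> rfl

lemma m0 : PySem.Dict.getD fl_mapping 0 PySem.Dict.empty = dict_char_to_int := by rfl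
lemma m1 : PySem.Dict.getD fl_mapping 1 PySem.Dict.empty = dict_char_to_int := by rfl
lemma m2 : PySem.Dict.getD fl_mapping 2 PySem.Dict.empty = dict_char_to_int := by rfl
lemma m3 : PySem.Dict.getD fl_mapping 3 PySem.Dict.empty = dict_int_to_char := by rfl
lemma m4 : PySem.Dict.getD fl_mapping 4 PySem.Dict.empty = dict_int_to_char := by rfl
lemma m5 : PySem.Dict.getD fl_mapping 5 PySem.Dict.empty = dict_int_to_char := by rfl
lemma m6 : PySem.Dict.getD fl_mapping 6 PySem.Dict.empty = PySem.Dict.empty := by rfl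

lemma key (cs : List Char) :
    ((PySem.List.pyRange 0 (min (cs.length : Int) 7) 1).foldl (fun acc j =>
      let c := PySem.List.pyGetD cs j ' '
      let dj := PySem.Dict.getD fl_mapping j PySem.Dict.empty
      if (PySem.Dict.get? dj c).isSome then acc ++ [PySem.Dict.getD dj c c] else acc ++ [c]) [])
    = (PySem.List.slice cs none (some 3)).map fl_c2i
      ++ (PySem.List.slice cs (some 3) (some 6)).map fl_i2c
      ++ PySem.List.slice cs (some 6) (some 7) := by
  rcases cs with _ | ⟨a, _ | ⟨b, _ | ⟨c, _ | ⟨d, _ | ⟨e, _ | ⟨f, _ | ⟨g, rest⟩⟩⟩⟩⟩⟩⟩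
  · decide
  · norm_num [PySem.List.pyRange, PySem.List.pyGetD, PySem.List.pyIdx?, PySem.List.slice,
      List.foldl, m0, m1, m2, m3, m4, m5, m6, ite_app, ite_single,
      char_cti, char_itc, char_empty, List.range_succ, List.getD,
      Nat.min_def, PySem.List.pyGet?]
    try simp [List.range_succ, m0, m1, m2, m3, m4, m5, m6, ite_single, char_cti, char_itc, char_empty]
  · norm_num [PySem.List.pyRange, PySem.List.pyGetD, PySem.List.pyIdx?, PySem.List.slice,
      List.foldl, m0, m1, m2, m3, m4, m5, m6, ite_app, ite_single,
      char_cti, char_itc, char_empty, List.range_succ, List.getD,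
      Nat.min_def, PySem.List.pyGet?]
    try simp [List.range_succ, m0, m1, m2, m3, m4, m5, m6, ite_single, char_cti, char_itc, char_empty]
  · norm_num [PySem.List.pyRange, PySem.List.pyGetD, PySem.List.pyIdx?, PySem.List.slice,
      List.foldl, m0, m1, m2, m3, m4, m5, m6, ite_app, ite_single,
      char_cti, char_itc, char_empty, List.range_succ, List.getD,
      Nat.min_def, PySem.List.pyGet?]
    try simp [List.range_succ, m0, m1, m2, m3, m4, m5, m6, ite_single, char_cti, char_itc, char_empty]
  · norm_num [PySem.List.pyRange, PySem.List.pyGetD, PySem.List.pyIdx?, PySem.List.slice,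
      List.foldl, m0, m1, m2, m3, m4, m5, m6, ite_app, ite_single,
      char_cti, char_itc, char_empty, List.range_succ, List.getD,
      Nat.min_def, PySem.List.pyGet?]
    try simp [List.range_succ, m0, m1, m2, m3, m4, m5, m6, ite_single, char_cti, char_itc, char_empty]
  · norm_num [PySem.List.pyRange, PySem.List.pyGetD, PySem.List.pyIdx?, PySem.List.slice,
      List.foldl, m0, m1, m2, m3, m4, m5, m6, ite_app, ite_single,
      char_cti, char_itc, char_empty, List.range_succ, List.getD,
      Nat.min_def, PySem.List.pyGet?]
    try simp [List.range_succ, m0, m1, m2, m3, m4, m5, m6, ite_single, char_cti, char_itc, char_empty]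
  · norm_num [PySem.List.pyRange, PySem.List.pyGetD, PySem.List.pyIdx?, PySem.List.slice,
      List.foldl, m0, m1, m2, m3, m4, m5, m6, ite_app, ite_single,
      char_cti, char_itc, char_empty, List.range_succ, List.getD,
      Nat.min_def, PySem.List.pyGet?]
    try simp [List.range_succ, m0, m1, m2, m3, m4, m5, m6, ite_single, char_cti, char_itc, char_empty]
  · have hmin : min (((a :: b :: c :: d :: e :: f :: g :: rest).length : Int)) 7 = 7 := by
      simp only [List.length_cons]
      push_cast
      omega
    rw [hmin]
    rw [show PySem.List.pyRange 0 7 1 = [0, 1, 2, 3, 4, 5, 6] from by decide]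
    have s1 : PySem.List.slice (a :: b :: c :: d :: e :: f :: g :: rest) none (some 3) = [a, b, c] := by
      rw [show (3:Int) = ((3:Nat):Int) from rfl, PySem.List.slice_to_natCast]; rfl
    have s2 : PySem.List.slice (a :: b :: c :: d :: e :: f :: g :: rest) (some 3) (some 6) = [d, e, f] := by
      rw [show (3:Int) = ((3:Nat):Int) from rfl, show (6:Int) = ((6:Nat):Int) from rfl,
          PySem.List.slice_natCast]; rfl
    have s3 : PySem.List.slice (a :: b :: c :: d :: e :: f :: g :: rest) (some 6) (some 7) = [g] := by
      rw [show (6:Int) = ((6:Nat):Int) from rfl, show (7:Int) = ((7:Nat):Int) from rfl,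
          PySem.List.slice_natCast]; rfl
    have g0 : PySem.List.pyGetD (a :: b :: c :: d :: e :: f :: g :: rest) 0 ' ' = a := by
      rw [show (0:Int) = ((0:Nat):Int) from rfl, PySem.List.pyGetD_natCast]; rfl
    have g1 : PySem.List.pyGetD (a :: b :: c :: d :: e :: f :: g :: rest) 1 ' ' = b := by
      rw [show (1:Int) = ((1:Nat):Int) from rfl, PySem.List.pyGetD_natCast]; rfl
    have g2 : PySem.List.pyGetD (a :: b :: c :: d :: e :: f :: g :: rest) 2 ' ' = c := by
      rw [show (2:Int) = ((2:Nat):Int) from rfl, PySem.List.pyGetD_natCast]; rfl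
    have g3 : PySem.List.pyGetD (a :: b :: c :: d :: e :: f :: g :: rest) 3 ' ' = d := by
      rw [show (3:Int) = ((3:Nat):Int) from rfl, PySem.List.pyGetD_natCast]; rfl
    have g4 : PySem.List.pyGetD (a :: b :: c :: d :: e :: f :: g :: rest) 4 ' ' = e := by
      rw [show (4:Int) = ((4:Nat):Int) from rfl, PySem.List.pyGetD_natCast]; rfl
    have g5 : PySem.List.pyGetD (a :: b :: c :: d :: e :: f :: g :: rest) 5 ' ' = f := by
      rw [show (5:Int) = ((5:Nat):Int) from rfl, PySem.List.pyGetD_natCast]; rfl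
    have g6 : PySem.List.pyGetD (a :: b :: c :: d :: e :: f :: g :: rest) 6 ' ' = g := by
      rw [show (6:Int) = ((6:Nat):Int) from rfl, PySem.List.pyGetD_natCast]; rfl
    simp only [List.foldl, g0, g1, g2, g3, g4, g5, g6, m0, m1, m2, m3, m4, m5, m6,
      ite_app, ite_single, char_cti, char_itc, char_empty, s1, s2, s3, List.nil_append,
      List.map_cons, List.map_nil]
    simp

-- ===== VERDICT (by name: the statement is the Claim_ definition above) =====
theorem format_license_spec : Claim_equal_format_license := by
  intro text _
  unfold Spec_format_license format_license format_license_alt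
  exact congrArg String.ofList (key text.toList)
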